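-- pv_equiv track=rewrite | github.com/jjob-spec/ingestkit | packages/ingestkit-pdf/src/ingestkit_pdf/utils/chunker.py | _extract_tables
-- ===== SOURCE A (Python) =====
-- def _extract_tables(text: str) -> list[tuple[int, int]]:
--     """Find contiguous markdown table regions in *text*.
--
--     Returns list of ``(start_offset, end_offset)`` for each table.
--     A table is a run of consecutive lines where each line contains ``|``.
--     """
--     regions: list[tuple[int, int]] = []
--     lines = text.split("\n")
--     offset = 0
--     in_table = False
--     table_start = 0
--
--     for line in lines:
--         line_end = offset + len(line) + 1  # +1 for the newline
--         if "|" in line: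
--             if not in_table:
--                 in_table = True
--                 table_start = offset
--         else:
--             if in_table:
--                 regions.append((table_start, offset))  # end before this line
--                 in_table = False
--         offset = line_end
--
--     if in_table:
--         # Table goes to end of text
--         regions.append((table_start, len(text)))
--
--     return regions
-- ===== SOURCE B (Python) =====
-- def _extract_tables(text: str) -> list[tuple[int, int]]:
--     """Two-pass version: build a prefix array of line start offsets and a
--     pipe flag per line, then scan indices grouping consecutive flagged lines."""
--     lines = text.split("\n")
--     n = len(lines)
--     starts = [0]
--     for line in lines:
--         starts.append(starts[-1] + len(line) + 1)
--     flags = ["|" in line for line in lines]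
--     regions = []
--     i = 0
--     while i < n:
--         if flags[i]:
--             j = i + 1
--             while j < n and flags[j]:
--                 j += 1
--             end = len(text) if j == n else starts[j]
--             regions.append((starts[i], end))
--             i = j
--         else:
--             i += 1
--     return regions
-- ===== Notes on version B (the rewrite author's own statement) =====
-- stated objective: alternative
-- what changed: A's single-pass in_table/table_start state machine is replaced by two passes: build a prefix array of line-start offsets plus a per-line pipe flag, then an index scan that groups consecutive flagged lines into runs and emits (start of first line, start of line after the run, or len(text) at EOF).
import Mathlib
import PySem

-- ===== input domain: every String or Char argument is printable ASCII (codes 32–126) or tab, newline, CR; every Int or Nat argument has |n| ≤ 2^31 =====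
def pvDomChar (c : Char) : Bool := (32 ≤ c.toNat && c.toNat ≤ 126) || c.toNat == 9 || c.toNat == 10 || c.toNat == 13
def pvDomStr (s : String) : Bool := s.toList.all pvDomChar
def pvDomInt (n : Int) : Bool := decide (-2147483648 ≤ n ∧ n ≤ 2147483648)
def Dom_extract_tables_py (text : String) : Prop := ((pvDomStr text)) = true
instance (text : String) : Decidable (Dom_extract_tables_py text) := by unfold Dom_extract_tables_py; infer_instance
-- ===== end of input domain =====

-- B replaces A's single-pass state machine by two passes (a prefix array of line-start
-- offsets and a pipe flag per line, then an index scan grouping consecutive flagged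
-- lines); same result and same asymptotic cost (objective: alternative decomposition).

-- text.split("\n"): "\n" ≠ "" so split? always returns some; the getD [] default is never used
def pyLines (text : String) : List String := (PySem.Str.split? text "\n").getD []

-- ===== PORT A =====
def aStep (st : List (Int × Int) × Int × Bool × Int) (line : String) :
    List (Int × Int) × Int × Bool × Int :=
  match st with
  | (regions, offset, in_table, table_start) =>
    let line_end := offset + ((PySem.Str.len line : Int) + 1)
    if PySem.Str.isIn "|" line then
      if !in_table then (regions, line_end, true, offset)
      else (regions, line_end, in_table, table_start)
    else
      if in_table then (regions ++ [(table_start, offset)], line_end, false, table_start)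
      else (regions, line_end, in_table, table_start)

def extract_tables_py (text : String) : List (Int × Int) :=
  let fin := (pyLines text).foldl aStep ([], 0, false, 0)
  if fin.2.2.1 then fin.1 ++ [(fin.2.2.2, (PySem.Str.len text : Int))] else fin.1

-- ===== PORT B =====
def altStarts (lines : List String) : List Int :=
  lines.foldl (fun s line => s ++ [s.getLast! + ((PySem.Str.len line : Int) + 1)]) [0]

def altScan (flags : List Bool) (n j : Nat) : Nat :=
  if h : j < n ∧ flags.getD j false = true then altScan flags n (j + 1) else j
termination_by n - j
decreasing_by omega

theorem altScan_le (flags : List Bool) (n j : Nat) : j ≤ altScan flags n j := by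
  fun_induction altScan flags n j with
  | case1 j h ih => omega
  | case2 j h => omega

def altLoop (tl : Int) (starts : List Int) (flags : List Bool) (n i : Nat)
    (regions : List (Int × Int)) : List (Int × Int) :=
  if hi : i < n then
    if flags.getD i false then
      let j := altScan flags n (i + 1)
      let e := if j = n then tl else starts.getD j 0
      altLoop tl starts flags n j (regions ++ [(starts.getD i 0, e)])
    else altLoop tl starts flags n (i + 1) regions
  else regions
termination_by n - i
decreasing_by
  · have := altScan_le flags n (i + 1); omega
  · omega

def extract_tables_py_alt (text : String) : List (Int × Int) :=
  let lines := pyLines text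
  altLoop (PySem.Str.len text : Int) (altStarts lines)
    (lines.map (fun line => PySem.Str.isIn "|" line)) lines.length 0 []

-- ===== PRECONDITION & SPEC =====
def Spec_extract_tables_py (text : String) (out : List (Int × Int)) : Prop := out = extract_tables_py_alt text
instance (text : String) (out : List (Int × Int)) : Decidable (Spec_extract_tables_py text out) := by unfold Spec_extract_tables_py; infer_instance

-- ===== CLAIM (what is proved, stated in full; the proofs are below) =====
def Claim_equal_extract_tables_py : Prop := ∀ (text : String), Dom_extract_tables_py text → Spec_extract_tables_py text (extract_tables_py text)

-- ===== LEMMAS AND PROOFS =====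

/-- A's trailing fix-up (the `if in_table` after the loop), as a function of the final state. -/
def aFinish (tl : Int) (fin : List (Int × Int) × Int × Bool × Int) : List (Int × Int) :=
  if fin.2.2.1 then fin.1 ++ [(fin.2.2.2, tl)] else fin.1

/-- Reference form of B's prefix array: line-start offsets from a running origin. -/
def startsOf (o : Int) : List String → List Int
  | [] => [o]
  | l :: ls => o :: startsOf (o + ((PySem.Str.len l : Int) + 1)) ls

theorem foldl_starts (lines : List String) (pre : List Int) (o : Int) :
    lines.foldl (fun s line => s ++ [s.getLast! + ((PySem.Str.len line : Int) + 1)]) (pre ++ [o])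
      = pre ++ startsOf o lines := by
  induction lines generalizing pre o with
  | nil => simp [startsOf]
  | cons l ls ih =>
    simp only [List.foldl_cons]
    have hl : (pre ++ [o]).getLast! = o := by simp
    rw [hl]
    have := ih (pre ++ [o]) (o + ((PySem.Str.len l : Int) + 1))
    rw [this, List.append_assoc]
    simp [startsOf]

theorem altStarts_eq (lines : List String) : altStarts lines = startsOf 0 lines := by
  simpa [altStarts] using foldl_starts lines [] 0

theorem startsOf_getD_zero (o : Int) (lines : List String) :
    (startsOf o lines).getD 0 0 = o := by
  cases lines <;> rfl

theorem startsOf_getD_succ (o : Int) (lines : List String) (i : Nat) (h : i < lines.length) :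
    (startsOf o lines).getD (i + 1) 0
      = (startsOf o lines).getD i 0 + ((PySem.Str.len lines[i] : Int) + 1) := by
  induction lines generalizing o i with
  | nil => simp at h
  | cons l ls ih =>
    cases i with
    | zero =>
      simp only [startsOf, List.getD_cons_succ, List.getD_cons_zero, List.getElem_cons_zero]
      exact startsOf_getD_zero _ ls
    | succ i =>
      simp only [startsOf, List.getD_cons_succ, List.getElem_cons_succ]
      exact ih _ i (by simpa using h)

theorem flags_getD (lines : List String) (pf : String → Bool) (i : Nat) (h : i < lines.length) :
    (lines.map pf).getD i false = pf lines[i] := by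
  rw [List.getD_eq_getElem?_getD, List.getElem?_map, List.getElem?_eq_getElem h]
  rfl

theorem altScan_eq_true (flags : List Bool) (n j : Nat) (h1 : j < n)
    (h2 : flags.getD j false = true) : altScan flags n j = altScan flags n (j + 1) := by
  rw [altScan, dif_pos ⟨h1, h2⟩]

theorem altScan_eq_stop (flags : List Bool) (n j : Nat)
    (h : ¬ (j < n ∧ flags.getD j false = true)) : altScan flags n j = j := by
  rw [altScan, dif_neg h]

theorem altScan_stop (flags : List Bool) (n j : Nat) :
    ¬ (altScan flags n j < n ∧ flags.getD (altScan flags n j) false = true) := by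
  fun_induction altScan flags n j with
  | case1 j h ih => exact ih
  | case2 j h => exact h

theorem altScan_le_n (flags : List Bool) (n j : Nat) (h : j ≤ n) : altScan flags n j ≤ n := by
  fun_induction altScan flags n j with
  | case1 j h' ih => exact ih (by omega)
  | case2 j h' => exact h

theorem altLoop_step_true (tl : Int) (starts : List Int) (flags : List Bool) (n i : Nat)
    (r : List (Int × Int)) (hi : i < n) (hf : flags.getD i false = true) :
    altLoop tl starts flags n i r
      = altLoop tl starts flags n (altScan flags n (i + 1))
          (r ++ [(starts.getD i 0,
                  if altScan flags n (i + 1) = n then tl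
                  else starts.getD (altScan flags n (i + 1)) 0)]) := by
  rw [altLoop, dif_pos hi, if_pos hf]

theorem altLoop_step_false (tl : Int) (starts : List Int) (flags : List Bool) (n i : Nat)
    (r : List (Int × Int)) (hi : i < n) (hf : flags.getD i false = false) :
    altLoop tl starts flags n i r = altLoop tl starts flags n (i + 1) r := by
  rw [altLoop, dif_pos hi, if_neg (by rw [hf]; exact Bool.false_ne_true)]

theorem altLoop_stop (tl : Int) (starts : List Int) (flags : List Bool) (n i : Nat)
    (r : List (Int × Int)) (hi : ¬ i < n) :
    altLoop tl starts flags n i r = r := by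
  rw [altLoop, dif_neg hi]

theorem aStep_pipe_out (r : List (Int × Int)) (o ts : Int) (line : String)
    (h : PySem.Str.isIn "|" line = true) :
    aStep (r, o, false, ts) line = (r, o + ((PySem.Str.len line : Int) + 1), true, o) := by
  simp only [aStep]; rw [h]; rfl

theorem aStep_pipe_in (r : List (Int × Int)) (o ts : Int) (line : String)
    (h : PySem.Str.isIn "|" line = true) :
    aStep (r, o, true, ts) line = (r, o + ((PySem.Str.len line : Int) + 1), true, ts) := by
  simp only [aStep]; rw [h]; rfl

theorem aStep_plain_out (r : List (Int × Int)) (o ts : Int) (line : String)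
    (h : PySem.Str.isIn "|" line = false) :
    aStep (r, o, false, ts) line = (r, o + ((PySem.Str.len line : Int) + 1), false, ts) := by
  simp only [aStep]; rw [h]; rfl

theorem aStep_plain_in (r : List (Int × Int)) (o ts : Int) (line : String)
    (h : PySem.Str.isIn "|" line = false) :
    aStep (r, o, true, ts) line
      = (r ++ [(ts, o)], o + ((PySem.Str.len line : Int) + 1), false, ts) := by
  simp only [aStep]; rw [h]; rfl

/-- The heart of the proof: A's fold from line `i` (regions so far `r`, offset = start of
line `i`, table state `it`/`ts`) followed by A's trailing fix-up equals B's index loop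
(mid-run when `it` is set: the pending region is emitted where B's inner scan stops). -/
theorem main_lemma (lines : List String) (tl : Int) (fuel : Nat) :
    ∀ i, lines.length - i = fuel → i ≤ lines.length →
    ∀ (it : Bool) (ts : Int) (r : List (Int × Int)),
    aFinish tl ((lines.drop i).foldl aStep (r, (startsOf 0 lines).getD i 0, it, ts))
    = (if it then
        (if altScan (lines.map (fun line => PySem.Str.isIn "|" line)) lines.length i
              = lines.length then r ++ [(ts, tl)]
         else altLoop tl (startsOf 0 lines)
                (lines.map (fun line => PySem.Str.isIn "|" line)) lines.length
                (altScan (lines.map (fun line => PySem.Str.isIn "|" line)) lines.length i + 1)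
                (r ++ [(ts, (startsOf 0 lines).getD
                  (altScan (lines.map (fun line => PySem.Str.isIn "|" line)) lines.length i) 0)]))
       else altLoop tl (startsOf 0 lines)
              (lines.map (fun line => PySem.Str.isIn "|" line)) lines.length i r) := by
  induction fuel with
  | zero =>
    intro i hf hle it ts r
    have hin : i = lines.length := by omega
    subst hin
    rw [List.drop_length, List.foldl_nil]
    cases it with
    | false =>
      simp only [aFinish]
      rw [if_neg Bool.false_ne_true, if_neg Bool.false_ne_true,
        altLoop_stop _ _ _ _ _ _ (by omega)]
    | true =>
      rw [altScan_eq_stop _ _ _ (fun hc => absurd hc.1 (by omega))]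
      simp only [aFinish]
      simp
  | succ m ih =>
    intro i hf hle it ts r
    have hi : i < lines.length := by omega
    have hdrop : lines.drop i = lines[i] :: lines.drop (i + 1) :=
      (List.getElem_cons_drop hi).symm
    have hoff : (startsOf 0 lines).getD i 0 + ((PySem.Str.len lines[i] : Int) + 1)
        = (startsOf 0 lines).getD (i + 1) 0 := (startsOf_getD_succ 0 lines i hi).symm
    have hflag : (lines.map (fun line => PySem.Str.isIn "|" line)).getD i false
        = PySem.Str.isIn "|" lines[i] := flags_getD lines _ i hi
    rw [hdrop, List.foldl_cons]
    cases hp : PySem.Str.isIn "|" lines[i] with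
    | true =>
      have hfl : (lines.map (fun line => PySem.Str.isIn "|" line)).getD i false = true := by
        rw [hflag, hp]
      cases it with
      | false =>
        rw [aStep_pipe_out _ _ _ _ hp, hoff,
          ih (i + 1) (by omega) (by omega) true ((startsOf 0 lines).getD i 0) r]
        rw [if_pos (show (true : Bool) = true from rfl), if_neg Bool.false_ne_true,
          altLoop_step_true _ _ _ _ _ _ hi hfl]
        by_cases hjn : altScan (lines.map (fun line => PySem.Str.isIn "|" line))
            lines.length (i + 1) = lines.length
        · rw [if_pos hjn, if_pos hjn, altLoop_stop _ _ _ _ _ _ (by omega)]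
        · have hjlt : altScan (lines.map (fun line => PySem.Str.isIn "|" line))
              lines.length (i + 1) < lines.length := by
            have := altScan_le_n (lines.map (fun line => PySem.Str.isIn "|" line))
              lines.length (i + 1) (by omega)
            omega
          have hjf : (lines.map (fun line => PySem.Str.isIn "|" line)).getD
              (altScan (lines.map (fun line => PySem.Str.isIn "|" line))
                lines.length (i + 1)) false = false := by
            have hstop := altScan_stop (lines.map (fun line => PySem.Str.isIn "|" line))
              lines.length (i + 1)
            cases hfe : (lines.map (fun line => PySem.Str.isIn "|" line)).getD
                (altScan (lines.map (fun line => PySem.Str.isIn "|" line))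
                  lines.length (i + 1)) false
            · rfl
            · exact absurd ⟨hjlt, hfe⟩ hstop
          rw [if_neg hjn, if_neg hjn, altLoop_step_false _ _ _ _ _ _ hjlt hjf]
      | true =>
        rw [aStep_pipe_in _ _ _ _ hp, hoff, ih (i + 1) (by omega) (by omega) true ts r]
        rw [if_pos (show (true : Bool) = true from rfl),
          if_pos (show (true : Bool) = true from rfl), altScan_eq_true _ _ _ hi hfl]
    | false =>
      have hfl : (lines.map (fun line => PySem.Str.isIn "|" line)).getD i false = false := by
        rw [hflag, hp]
      have hsc : altScan (lines.map (fun line => PySem.Str.isIn "|" line)) lines.length i = i :=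
        altScan_eq_stop _ _ _ (by rw [hfl]; simp)
      cases it with
      | false =>
        rw [aStep_plain_out _ _ _ _ hp, hoff, ih (i + 1) (by omega) (by omega) false ts r]
        rw [if_neg Bool.false_ne_true, if_neg Bool.false_ne_true,
          altLoop_step_false _ _ _ _ _ _ hi hfl]
      | true =>
        rw [aStep_plain_in _ _ _ _ hp, hoff,
          ih (i + 1) (by omega) (by omega) false ts (r ++ [(ts, (startsOf 0 lines).getD i 0)])]
        rw [if_neg Bool.false_ne_true, if_pos (show (true : Bool) = true from rfl), hsc,
          if_neg (show ¬ i = lines.length by omega)]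

-- ===== VERDICT (by name: the statement is the Claim_ definition above) =====
theorem extract_tables_py_spec : Claim_equal_extract_tables_py := by
  intro text _
  show extract_tables_py text = extract_tables_py_alt text
  have h := main_lemma (pyLines text) (PySem.Str.len text : Int) (pyLines text).length
    0 (by omega) (by omega) false 0 []
  rw [startsOf_getD_zero, List.drop_zero] at h
  rw [if_neg Bool.false_ne_true] at h
  show aFinish (PySem.Str.len text : Int) ((pyLines text).foldl aStep ([], 0, false, 0))
      = altLoop (PySem.Str.len text : Int) (altStarts (pyLines text))
          ((pyLines text).map (fun line => PySem.Str.isIn "|" line)) (pyLines text).length 0 []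
  rw [altStarts_eq]
  exact h
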